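-- pv_equiv track=rewrite | github.com/davidcantidio/npbb | tools/mcp-bb-scraping/generate_report.py | normalize_mentions
-- ===== SOURCE A (Python) =====
-- from typing import Any, Dict, Iterable, List, Optional, Sequence, Tuple
--
-- def unique_ordered(items: Iterable[str]) -> List[str]:
--     seen = set()
--     out = []
--     for item in items:
--         key = item.lower()
--         if key in seen:
--             continue
--         seen.add(key)
--         out.append(item)
--     return out
--
-- def normalize_mentions(items: Iterable[str]) -> List[str]:
--     out = []
--     for raw in items:
--         s = str(raw).strip().lower()
--         if not s:
--             continue
--         if s.startswith("#"):
--             continue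
--         if not s.startswith("@"):
--             s = "@" + s
--         out.append(s)
--     return unique_ordered(out)
-- ===== SOURCE B (Python) =====
-- def normalize_mentions(items):
--     # One fused pass: normalize and dedupe together (normalized strings are
--     # already lowercase, so the lowercase dedup key equals the string itself).
--     seen = set()
--     out = []
--     for raw in items:
--         s = str(raw).strip().lower()
--         if not s or s.startswith("#"):
--             continue
--         if not s.startswith("@"):
--             s = "@" + s
--         if s not in seen:
--             seen.add(s)
--             out.append(s)
--     return out
-- ===== Notes on version B (the rewrite author's own statement) =====
-- stated objective: simpler
-- what changed: Fuses A's two sequential passes (normalize into a list, then unique_ordered with a lowercase key) into one loop that maintains the seen-set and output directly, dropping the helper and the lowercase re-keying since normalized strings are already lowercase.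
import Mathlib
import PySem

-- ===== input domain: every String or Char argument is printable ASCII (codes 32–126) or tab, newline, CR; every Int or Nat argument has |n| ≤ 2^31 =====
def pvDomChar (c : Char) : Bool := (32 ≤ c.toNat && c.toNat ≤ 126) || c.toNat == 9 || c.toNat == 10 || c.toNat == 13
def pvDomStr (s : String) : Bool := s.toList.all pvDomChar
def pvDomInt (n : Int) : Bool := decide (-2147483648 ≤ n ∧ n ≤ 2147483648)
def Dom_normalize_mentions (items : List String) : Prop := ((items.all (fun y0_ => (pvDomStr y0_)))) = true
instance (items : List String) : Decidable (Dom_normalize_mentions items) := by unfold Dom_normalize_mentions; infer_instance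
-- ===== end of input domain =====

-- B fuses A's two passes (normalize, then unique_ordered with a lowercase key) into one
-- loop with a seen-set; equivalent because normalized strings are already lowercase.

-- ===== PORT A =====
-- loop body of unique_ordered: state = (seen, out)
def pvUStep (st : PySem.Set String × List String) (item : String) : PySem.Set String × List String :=
  let key := PySem.Str.lower item
  if PySem.Set.contains st.1 key then st
  else (PySem.Set.add st.1 key, st.2 ++ [item])

def unique_ordered (items : List String) : List String :=
  (items.foldl pvUStep (PySem.Set.empty, [])).2

-- s = str(raw).strip().lower()
def pvNorm (raw : String) : String := PySem.Str.lower (PySem.Str.strip raw)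

-- '"@" + s' is ported exactly as String.ofList ('@' :: s.toList)
def pvTag (s : String) : String :=
  if PySem.Str.startswith s "@" then s else String.ofList ('@' :: s.toList)

-- loop body of normalize_mentions
def pvStepA (out : List String) (raw : String) : List String :=
  if (pvNorm raw).toList = [] then out
  else if PySem.Str.startswith (pvNorm raw) "#" then out
  else out ++ [pvTag (pvNorm raw)]

def normalize_mentions (items : List String) : List String :=
  unique_ordered (items.foldl pvStepA [])

-- ===== PORT B =====
-- single fused loop body: state = (seen, out)
def pvStepB (st : PySem.Set String × List String) (raw : String) : PySem.Set String × List String :=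
  if (pvNorm raw).toList = [] ∨ PySem.Str.startswith (pvNorm raw) "#" then st
  else
    if PySem.Set.contains st.1 (pvTag (pvNorm raw)) then st
    else (PySem.Set.add st.1 (pvTag (pvNorm raw)), st.2 ++ [pvTag (pvNorm raw)])

def normalize_mentions_alt (items : List String) : List String :=
  (items.foldl pvStepB (PySem.Set.empty, [])).2

-- ===== PRECONDITION & SPEC =====
def Spec_normalize_mentions (items : List String) (out : List String) : Prop := out = normalize_mentions_alt items
instance (items : List String) (out : List String) : Decidable (Spec_normalize_mentions items out) := by unfold Spec_normalize_mentions; infer_instance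

-- ===== CLAIM (what is proved, stated in full; the proofs are below) =====
def Claim_equal_normalize_mentions : Prop := ∀ (items : List String), Dom_normalize_mentions items → Spec_normalize_mentions items (normalize_mentions items)

-- ===== LEMMAS AND PROOFS =====

-- the shared normalization of one raw item, as a partial map
def pvG (raw : String) : Option String :=
  if (pvNorm raw).toList = [] then none
  else if PySem.Str.startswith (pvNorm raw) "#" then none
  else some (pvTag (pvNorm raw))

-- dedup step with the string itself as key
def pvDStep (st : PySem.Set String × List String) (s : String) : PySem.Set String × List String :=
  if PySem.Set.contains st.1 s then st
  else (PySem.Set.add st.1 s, st.2 ++ [s])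

theorem pvCharToNatOfNat (n : Nat) (h : n < 55296) : (Char.ofNat n).toNat = n := by
  unfold Char.ofNat
  rw [dif_pos (Or.inl h)]
  simp [Char.ofNatAux, Char.toNat, UInt32.toNat_ofNatLT]

theorem pvLowerCharIdem (c : Char) :
    PySem.Chars.lowerChar (PySem.Chars.lowerChar c) = PySem.Chars.lowerChar c := by
  unfold PySem.Chars.lowerChar PySem.Chars.isupper
  split_ifs with h1 h2
  · exfalso
    simp only [Bool.and_eq_true, decide_eq_true_eq, Char.le_def, UInt32.le_iff_toNat_le] at h1 h2
    have hc : c.toNat ≤ 90 := h1.2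
    have hof : (Char.ofNat (c.toNat + 32)).toNat = c.toNat + 32 := pvCharToNatOfNat _ (by omega)
    change _ ≤ (Char.ofNat (c.toNat + 32)).toNat ∧ (Char.ofNat (c.toNat + 32)).toNat ≤ _ at h2
    rw [hof] at h2
    have h65 : 65 ≤ c.toNat := h1.1
    have hA2 : ('A' : Char).val.toNat = 65 := by decide
    have hZ2 : ('Z' : Char).val.toNat = 90 := by decide
    omega
  · rfl
  · rfl

theorem pvLowerIdemChars (cs : List Char) :
    PySem.Chars.lower (PySem.Chars.lower cs) = PySem.Chars.lower cs := by
  simp [PySem.Chars.lower, List.map_map, Function.comp_def, pvLowerCharIdem]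

-- the normalized string is a fixed point of lower
theorem pvNorm_fixed (raw : String) : PySem.Str.lower (pvNorm raw) = pvNorm raw := by
  apply String.toList_inj.mp
  unfold pvNorm
  rw [PySem.Str.toList_lower, PySem.Str.toList_lower]
  exact pvLowerIdemChars _

theorem pvTag_fixed (t : String) (ht : PySem.Str.lower t = t) :
    PySem.Str.lower (pvTag t) = pvTag t := by
  unfold pvTag
  split_ifs with h
  · exact ht
  · apply String.toList_inj.mp
    rw [PySem.Str.toList_lower, String.toList_ofList]
    show PySem.Chars.lower ('@' :: t.toList) = '@' :: t.toList
    unfold PySem.Chars.lower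
    rw [List.map_cons]
    have hl : PySem.Chars.lower t.toList = t.toList := by
      rw [← PySem.Str.toList_lower, ht]
    exact congrArg₂ (· :: ·) (by decide) hl

-- every string pvG produces is a fixed point of lower
theorem pvG_lower_fixed (raw s : String) (h : pvG raw = some s) :
    PySem.Str.lower s = s := by
  unfold pvG at h
  by_cases h1 : (pvNorm raw).toList = []
  · rw [if_pos h1] at h; exact absurd h (by simp)
  · rw [if_neg h1] at h
    by_cases h2 : PySem.Str.startswith (pvNorm raw) "#" = true
    · rw [if_pos h2] at h; exact absurd h (by simp)
    · rw [if_neg h2] at h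
      have hs := Option.some.inj h
      subst hs
      exact pvTag_fixed _ (pvNorm_fixed raw)

-- A's normalization loop builds exactly the filterMap of pvG
theorem pvFoldA (items : List String) : ∀ out : List String,
    items.foldl pvStepA out = out ++ items.filterMap pvG := by
  induction items with
  | nil => simp
  | cons x xs ih =>
    intro out
    rw [List.foldl_cons]
    by_cases h1 : (pvNorm x).toList = []
    · rw [List.filterMap_cons_none (by unfold pvG; rw [if_pos h1]),
          show pvStepA out x = out from by unfold pvStepA; rw [if_pos h1]]
      exact ih out
    · by_cases h2 : PySem.Str.startswith (pvNorm x) "#" = true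
      · rw [List.filterMap_cons_none (by unfold pvG; rw [if_neg h1, if_pos h2]),
            show pvStepA out x = out from by unfold pvStepA; rw [if_neg h1, if_pos h2]]
        exact ih out
      · rw [List.filterMap_cons_some (by unfold pvG; rw [if_neg h1, if_neg h2]),
            show pvStepA out x = out ++ [pvTag (pvNorm x)] from by
              unfold pvStepA; rw [if_neg h1, if_neg h2]]
        rw [ih, List.append_assoc]
        rfl

-- B's fused loop equals the key-as-is dedup fold over the filterMap of pvG
theorem pvFoldB (items : List String) : ∀ st : PySem.Set String × List String,
    items.foldl pvStepB st = (items.filterMap pvG).foldl pvDStep st := by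
  induction items with
  | nil => simp
  | cons x xs ih =>
    intro st
    rw [List.foldl_cons]
    by_cases h1 : (pvNorm x).toList = []
    · rw [List.filterMap_cons_none (by unfold pvG; rw [if_pos h1]),
          show pvStepB st x = st from by unfold pvStepB; rw [if_pos (Or.inl h1)]]
      exact ih st
    · by_cases h2 : PySem.Str.startswith (pvNorm x) "#" = true
      · rw [List.filterMap_cons_none (by unfold pvG; rw [if_neg h1, if_pos h2]),
            show pvStepB st x = st from by unfold pvStepB; rw [if_pos (Or.inr h2)]]
        exact ih st
      · rw [List.filterMap_cons_some (by unfold pvG; rw [if_neg h1, if_neg h2]),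
            show pvStepB st x = pvDStep st (pvTag (pvNorm x)) from by
              unfold pvStepB pvDStep; rw [if_neg (not_or.mpr ⟨h1, h2⟩)],
            List.foldl_cons]
        exact ih _

-- on lower-fixed strings unique_ordered's step is the plain dedup step
theorem pvFoldU (L : List String) : ∀ st : PySem.Set String × List String,
    (∀ s ∈ L, PySem.Str.lower s = s) →
    L.foldl pvUStep st = L.foldl pvDStep st := by
  induction L with
  | nil => intro st _; rfl
  | cons x xs ih =>
    intro st h
    have hx : PySem.Str.lower x = x := h x (by simp)
    simp only [List.foldl_cons]
    rw [show pvUStep st x = pvDStep st x from by simp [pvUStep, pvDStep, hx]]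
    exact ih _ (fun s hs => h s (by simp [hs]))

-- ===== VERDICT (by name: the statement is the Claim_ definition above) =====
theorem normalize_mentions_spec : Claim_equal_normalize_mentions := by
  intro items _
  unfold Spec_normalize_mentions normalize_mentions normalize_mentions_alt unique_ordered
  rw [pvFoldA items [], List.nil_append, pvFoldB]
  rw [pvFoldU]
  intro s hs
  rcases List.mem_filterMap.mp hs with ⟨raw, _, hg⟩
  exact pvG_lower_fixed raw s hg
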